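-- pv_equiv track=rewrite | github.com/trojsten/editor-2018-jar | judge/test/12/config.py | solve
-- ===== SOURCE A (Python) =====
-- def solve(N,mapa):
-- 	wololo = 0
-- 	for i in range(N):
-- 		modry = True
-- 		for c in mapa[i]:
-- 			if c=='p' and modry:
-- 				modry,wololo = False,wololo+1
-- 			elif c=='P' and modry == False:
-- 				modry,wololo = True,wololo+1
--
-- 	return wololo
-- ===== SOURCE B (Python) =====
-- def solve(N, mapa):
--     total = 0
--     for i in range(N):
--         runs = []
--         for c in mapa[i]:
--             if c in 'pP' and (not runs or runs[-1] != c):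
--                 runs.append(c)
--         if runs:
--             total += len(runs) - (runs[0] == 'P')
--     return total
-- ===== Notes on version B (the rewrite author's own statement) =====
-- stated objective: alternative
-- what changed: Replaces the per-character boolean toggle state machine by a build-then-count pass: each row is reduced to the list of collapsed runs of 'p'/'P' characters, and the row's contribution is the run count (minus one when the row's first run is 'P').
import Mathlib
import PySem

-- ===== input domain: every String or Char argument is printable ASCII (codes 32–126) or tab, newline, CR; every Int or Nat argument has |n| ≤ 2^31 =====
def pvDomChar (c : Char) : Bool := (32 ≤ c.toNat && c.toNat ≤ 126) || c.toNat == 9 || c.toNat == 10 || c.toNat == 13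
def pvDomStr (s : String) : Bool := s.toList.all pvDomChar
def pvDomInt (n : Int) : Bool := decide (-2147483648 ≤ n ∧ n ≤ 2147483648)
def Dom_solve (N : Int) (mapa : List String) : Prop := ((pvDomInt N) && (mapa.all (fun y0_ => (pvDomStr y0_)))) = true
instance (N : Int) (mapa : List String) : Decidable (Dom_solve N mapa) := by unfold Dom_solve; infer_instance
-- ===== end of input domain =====

-- B replaces A's per-character toggle state machine by collapsing each row's 'p'/'P' runs and counting them; same cost, different decomposition.

-- ===== PORT A =====
-- inner state machine of A: state = (modry, wololo)
def solveStepA (st : Bool × Int) (c : Char) : Bool × Int :=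
  if c = 'p' ∧ st.1 = true then (false, st.2 + 1)
  else if c = 'P' ∧ st.1 = false then (true, st.2 + 1)
  else st

def solve (N : Int) (mapa : List String) : Int :=
  (PySem.List.pyRange 0 N 1).foldl (fun wololo i =>
    match PySem.List.pyGet? mapa i with
    | none => wololo            -- Python raises IndexError here; excluded by Pre_solve
    | some row => (row.toList.foldl solveStepA (true, wololo)).2) 0

-- ===== PORT B =====
-- B's inner pass: collapse consecutive duplicate 'p'/'P' characters into runs
def solveStepB (rs : List Char) (c : Char) : List Char :=
  if (c = 'p' ∨ c = 'P') ∧ (rs = [] ∨ ¬ rs.getLast? = some c) then rs ++ [c] else rs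

def solveContrib (rs : List Char) : Int :=
  match rs with
  | [] => 0
  | r :: t => ((r :: t).length : Int) - (if r = 'P' then 1 else 0)

def solve_alt (N : Int) (mapa : List String) : Int :=
  (PySem.List.pyRange 0 N 1).foldl (fun total i =>
    match PySem.List.pyGet? mapa i with
    | none => total             -- Python raises IndexError here; excluded by Pre_solve
    | some row => total + solveContrib (row.toList.foldl solveStepB [])) 0

-- ===== PRECONDITION & SPEC =====
-- Pre_: A (and B) raise IndexError when some i in range(N) exceeds the map, i.e. when N > len(mapa).
def Pre_solve (N : Int) (mapa : List String) : Prop := N ≤ (mapa.length : Int)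
instance (N : Int) (mapa : List String) : Decidable (Pre_solve N mapa) := by unfold Pre_solve; infer_instance
def pvWitness_solve : Int × List String := (2, ["pPx p", "PPpq"])
def Spec_solve (N : Int) (mapa : List String) (out : Int) : Prop := out = solve_alt N mapa
instance (N : Int) (mapa : List String) (out : Int) : Decidable (Spec_solve N mapa out) := by unfold Spec_solve; infer_instance

-- ===== CLAIM (what is proved, stated in full; the proofs are below) =====
def Claim_equal_solve : Prop := ∀ (N : Int) (mapa : List String), Dom_solve N mapa → Pre_solve N mapa → Spec_solve N mapa (solve N mapa)

-- ===== LEMMAS AND PROOFS =====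

-- simulation invariant between A's toggle state and B's run list, per row
lemma solve_row_sim : ∀ (s rs : List Char) (modry : Bool) (w0 : Int),
    (modry = true ↔ ¬ rs.getLast? = some 'p') →
    (∀ x ∈ rs, x = 'p' ∨ x = 'P') →
    (s.foldl solveStepA (modry, w0 + solveContrib rs)).2
      = w0 + solveContrib (s.foldl solveStepB rs) := by
  intro s
  induction s with
  | nil => intro rs modry w0 _ _; simp
  | cons c s ih =>
    intro rs modry w0 hlast hmem
    simp only [List.foldl_cons]
    by_cases hc : (c = 'p' ∨ c = 'P') ∧ (rs = [] ∨ ¬ rs.getLast? = some c)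
    · -- B appends c
      have hB : solveStepB rs c = rs ++ [c] := by simp [solveStepB, hc]
      rw [hB]
      -- compute A's step and the new contribution
      have hcontrib : solveContrib (rs ++ [c])
          = solveContrib rs + (if rs = [] ∧ c = 'P' then 0 else 1) := by
        cases rs with
        | nil => rcases hc.1 with h | h <;> simp [solveContrib, h]
        | cons r t =>
          have : ¬ ((r :: t) = [] ∧ c = 'P') := by simp
          simp only [this, List.cons_append]
          simp [solveContrib]; ring
      rcases hc.1 with hp | hP
      · -- c = 'p' : A counts iff modry; here last rs ≠ 'p' cases
        subst hp
        have hmodry : modry = true := by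
          rcases hc.2 with h | h
          · exact hlast.mpr (by simp [h])
          · exact hlast.mpr h
        have hA : solveStepA (modry, w0 + solveContrib rs) 'p'
            = (false, w0 + solveContrib rs + 1) := by
          simp [solveStepA, hmodry]
        rw [hA]
        have key := ih (rs ++ ['p']) false w0 (by simp)
          (by intro x hx
              rcases List.mem_append.mp hx with h | h
              · exact hmem x h
              · left; simpa using h)
        rw [show w0 + solveContrib rs + 1 = w0 + solveContrib (rs ++ ['p']) from by
          rw [hcontrib]
          have : ¬ (rs = [] ∧ 'p' = 'P') := by rintro ⟨_, h⟩; exact absurd h (by decide)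
          simp; ring]
        exact key
      · -- c = 'P' : B appends; A counts iff ¬modry i.e. rs nonempty ending in 'p'
        subst hP
        cases rs with
        | nil =>
          have hmodry : modry = true := hlast.mpr (by simp)
          have hA : solveStepA (modry, w0 + solveContrib ([] : List Char)) 'P'
              = (modry, w0 + solveContrib ([] : List Char)) := by
            simp [solveStepA, hmodry]
          rw [hA, hmodry]
          have key := ih ([] ++ ['P']) true w0 (by simp)
            (by intro x hx; right; simpa using hx)
          rw [show w0 + solveContrib ([] : List Char) = w0 + solveContrib ([] ++ ['P']) from by
            simp [solveContrib]]
          exact key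
        | cons r t =>
          have hlastp : (r :: t).getLast? = some 'p' := by
            rcases hc.2 with h | h
            · exact absurd h (by simp)
            · have hmemlast : (r :: t).getLast (by simp) ∈ r :: t := List.getLast_mem _
              have hl : (r :: t).getLast? = some ((r :: t).getLast (by simp)) := by
                simp [List.getLast?_eq_some_getLast]
              rcases hmem _ hmemlast with h2 | h2
              · rw [hl, h2]
              · exact absurd (by rw [hl, h2]) h
          have hmodry : modry = false := by
            by_contra hm
            have : modry = true := by cases modry <;> simp_all
            exact (hlast.mp this) hlastp
          have hA : solveStepA (modry, w0 + solveContrib (r :: t)) 'P'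
              = (true, w0 + solveContrib (r :: t) + 1) := by
            simp [solveStepA, hmodry]
          rw [hA]
          have key := ih ((r :: t) ++ ['P']) true w0
            (by rw [show r :: t ++ ['P'] = (r :: t) ++ ['P'] from rfl, List.getLast?_concat]; decide)
            (by intro x hx
                rcases List.mem_append.mp hx with h | h
                · exact hmem x h
                · right; simpa using h)
          rw [show w0 + solveContrib (r :: t) + 1 = w0 + solveContrib ((r :: t) ++ ['P']) from by
            rw [hcontrib]; simp; ring]
          exact key
    · -- B does not append; show A does not count either
      have hB : solveStepB rs c = rs := by simp [solveStepB, hc]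
      rw [hB]
      have hA : solveStepA (modry, w0 + solveContrib rs) c = (modry, w0 + solveContrib rs) := by
        rcases not_and_or.mp hc with h | h
        · -- c is neither 'p' nor 'P'
          push Not at h
          simp [solveStepA, h.1, h.2]
        · -- rs nonempty and last rs = c
          push Not at h
          obtain ⟨hne, hlc⟩ := h
          by_cases hcp : c = 'p'
          · subst hcp
            have : modry = false := by
              by_contra hm
              have hm' : modry = true := by cases modry <;> simp_all
              exact (hlast.mp hm') hlc
            simp [solveStepA, this]
          · by_cases hcP : c = 'P'
            · subst hcP
              have : modry = true := hlast.mpr (by rw [hlc]; decide)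
              simp [solveStepA, this, hcp]
            · simp [solveStepA, hcp, hcP]
      rw [hA]
      exact ih rs modry w0 hlast hmem

-- per-row equality: A's inner loop starting fresh equals w + B's run contribution
lemma solve_row_eq (row : List Char) (w : Int) :
    (row.foldl solveStepA (true, w)).2 = w + solveContrib (row.foldl solveStepB []) := by
  have := solve_row_sim row [] true w (by simp) (by simp)
  simpa [solveContrib] using this

-- the two outer folds have pointwise-equal step functions
lemma solve_fold_eq (l : List Int) (mapa : List String) (w : Int) :
    l.foldl (fun wololo i =>
      match PySem.List.pyGet? mapa i with
      | none => wololo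
      | some row => (row.toList.foldl solveStepA (true, wololo)).2) w
    = l.foldl (fun total i =>
      match PySem.List.pyGet? mapa i with
      | none => total
      | some row => total + solveContrib (row.toList.foldl solveStepB [])) w := by
  induction l generalizing w with
  | nil => rfl
  | cons i l ih =>
    simp only [List.foldl_cons]
    cases PySem.List.pyGet? mapa i with
    | none => exact ih w
    | some row => dsimp only; rw [solve_row_eq]; exact ih _

-- ===== VERDICT (by name: the statement is the Claim_ definition above) =====
theorem solve_spec : Claim_equal_solve := by
  intro N mapa _ _
  unfold Spec_solve solve solve_alt
  exact solve_fold_eq _ mapa 0
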